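-- pv_equiv track=rewrite | github.com/Apollo0317/network-communication-project | phy/modulator.py | generate_QAM_mapping
-- ===== SOURCE A (Python) =====
-- def generate_QAM_mapping(order: int = 16) -> dict[str, list]:
--     """
--     Generate 16-QAM constellation mapping
--
--     Uses Gray coding to map 4 bits to I/Q channels (2 bits each)
--     Constellation points: I, Q ∈ {-3, -1, 1, 3}
--
--     Args:
--         order: QAM order, default 16
--
--     Returns:
--         Mapping dictionary, key is bit list string, value is [I, Q] coordinates
--     """
--     mapping = {}
--     for code in range(order):
--         # Convert code to 4-bit representation
--         bit_list = [(code >> i) & 1 for i in range(3, -1, -1)]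
--         # First 2 bits map to I channel, last 2 bits map to Q channel
--         I_bit, Q_bit = bit_list[:2], bit_list[2:]
--
--         # Gray coding mapping: 00->-3, 01->-1, 11->1, 10->3
--         if I_bit == [0, 0]:
--             I_out = -3
--         elif I_bit == [0, 1]:
--             I_out = -1
--         elif I_bit == [1, 1]:
--             I_out = 1
--         else:
--             I_out = 3
--
--         if Q_bit == [0, 0]:
--             Q_out = -3
--         elif Q_bit == [0, 1]:
--             Q_out = -1
--         elif Q_bit == [1, 1]:
--             Q_out = 1
--         else:
--             Q_out = 3
--
--         mapping[str(bit_list)] = [I_out, Q_out]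
--     return mapping
-- ===== SOURCE B (Python) =====
-- def generate_QAM_mapping(order: int = 16) -> dict[str, list]:
--     """Gray-decoded 16-QAM mapping.
--
--     The per-bit-pair level comes from the closed-form Gray decode
--     2*(2*b_hi + (b_hi + b_lo) % 2) - 3 instead of a branch table, and the
--     loop is capped at 16: codes >= 16 only repeat the same key/value pairs
--     (the key uses only the low 4 bits), so they never change the dict.
--     """
--     mapping = {}
--     for code in range(min(order, 16)):
--         bits = [(code >> i) & 1 for i in range(3, -1, -1)]
--         b3, b2, b1, b0 = bits
--         mapping[str(bits)] = [2 * (2 * b3 + (b3 + b2) % 2) - 3,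
--                               2 * (2 * b1 + (b1 + b0) % 2) - 3]
--     return mapping
-- ===== Notes on version B (the rewrite author's own statement) =====
-- stated objective: faster
-- what changed: Replaces the if/elif Gray branch tables with the closed-form decode 2*(2*b_hi+(b_hi+b_lo)%2)-3 and caps the loop at min(order,16), since codes >= 16 only re-insert identical key/value pairs (the key uses only the low 4 bits).
import Mathlib
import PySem

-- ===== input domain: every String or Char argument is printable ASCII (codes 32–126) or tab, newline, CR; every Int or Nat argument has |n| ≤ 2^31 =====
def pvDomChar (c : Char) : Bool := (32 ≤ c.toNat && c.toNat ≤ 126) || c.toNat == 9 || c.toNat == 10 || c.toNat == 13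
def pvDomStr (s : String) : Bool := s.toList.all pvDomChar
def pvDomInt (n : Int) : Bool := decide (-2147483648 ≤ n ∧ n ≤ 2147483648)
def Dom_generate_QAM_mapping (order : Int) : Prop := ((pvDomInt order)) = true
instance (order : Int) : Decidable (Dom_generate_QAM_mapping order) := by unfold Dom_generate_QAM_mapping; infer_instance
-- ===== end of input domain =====

-- B replaces A's if/elif Gray branch tables by the closed-form decode
-- 2*(2*b_hi + (b_hi+b_lo) % 2) - 3 and caps the loop at min(order, 16),
-- since codes >= 16 only re-insert identical key/value pairs.

-- ===== PORT A =====

-- str(bit_list) for a Python list of ints: exact ("[a, b, c, d]", ", "-separated reprs)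
def pyStrIntList (xs : List Int) : String :=
  "[" ++ String.intercalate ", " (xs.map PySem.Int.toStr) ++ "]"

-- (code >> i) & 1 : exact as floor-division by 2^i then mod 2 (arithmetic shift
-- and two's-complement & 1 agree with floor // and % for every int)
def pyBit (code i : Int) : Int :=
  PySem.Int.mod (PySem.Int.floordiv code (2 ^ i.toNat)) 2

def generate_QAM_mapping (order : Int) : List (String × List Int) :=
  ((PySem.List.pyRange 0 order 1).foldl
    (fun (mapping : PySem.Dict String (List Int)) code =>
      let bit_list := (PySem.List.pyRange 3 (-1) (-1)).map (fun i => pyBit code i)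
      let I_bit := PySem.List.slice bit_list none (some 2)
      let Q_bit := PySem.List.slice bit_list (some 2) none
      let I_out : Int :=
        if I_bit = [0, 0] then -3
        else if I_bit = [0, 1] then -1
        else if I_bit = [1, 1] then 1
        else 3
      let Q_out : Int :=
        if Q_bit = [0, 0] then -3
        else if Q_bit = [0, 1] then -1
        else if Q_bit = [1, 1] then 1
        else 3
      mapping.insert (pyStrIntList bit_list) [I_out, Q_out])
    PySem.Dict.empty).items

-- ===== PORT B =====
def generate_QAM_mapping_alt (order : Int) : List (String × List Int) :=
  ((PySem.List.pyRange 0 (min order 16) 1).foldl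
    (fun (mapping : PySem.Dict String (List Int)) code =>
      let bits := (PySem.List.pyRange 3 (-1) (-1)).map (fun i => pyBit code i)
      -- b3, b2, b1, b0 = bits  (bits always has length 4)
      let b3 := PySem.List.pyGetD bits 0 0
      let b2 := PySem.List.pyGetD bits 1 0
      let b1 := PySem.List.pyGetD bits 2 0
      let b0 := PySem.List.pyGetD bits 3 0
      mapping.insert (pyStrIntList bits)
        [2 * (2 * b3 + PySem.Int.mod (b3 + b2) 2) - 3,
         2 * (2 * b1 + PySem.Int.mod (b1 + b0) 2) - 3])
    PySem.Dict.empty).items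

-- ===== PRECONDITION & SPEC =====
def Spec_generate_QAM_mapping (order : Int) (out : List (String × List Int)) : Prop := out = generate_QAM_mapping_alt order
instance (order : Int) (out : List (String × List Int)) : Decidable (Spec_generate_QAM_mapping order out) := by unfold Spec_generate_QAM_mapping; infer_instance

-- ===== CLAIM (what is proved, stated in full; the proofs are below) =====
def Claim_equal_generate_QAM_mapping : Prop := ∀ (order : Int), Dom_generate_QAM_mapping order → Spec_generate_QAM_mapping order (generate_QAM_mapping order)

-- ===== LEMMAS AND PROOFS =====

-- A's per-code step function (defeq to the lambda in the port's foldl)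
def stepA (mapping : PySem.Dict String (List Int)) (code : Int) : PySem.Dict String (List Int) :=
  mapping.insert (pyStrIntList [pyBit code 3, pyBit code 2, pyBit code 1, pyBit code 0])
    [if ([pyBit code 3, pyBit code 2] : List Int) = [0, 0] then -3
     else if [pyBit code 3, pyBit code 2] = [0, 1] then -1
     else if [pyBit code 3, pyBit code 2] = [1, 1] then 1
     else 3,
     if ([pyBit code 1, pyBit code 0] : List Int) = [0, 0] then -3
     else if [pyBit code 1, pyBit code 0] = [0, 1] then -1
     else if [pyBit code 1, pyBit code 0] = [1, 1] then 1
     else 3]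

-- B's per-code step function (defeq to the lambda in the port's foldl)
def stepB (mapping : PySem.Dict String (List Int)) (code : Int) : PySem.Dict String (List Int) :=
  mapping.insert (pyStrIntList [pyBit code 3, pyBit code 2, pyBit code 1, pyBit code 0])
    [2 * (2 * pyBit code 3 + PySem.Int.mod (pyBit code 3 + pyBit code 2) 2) - 3,
     2 * (2 * pyBit code 1 + PySem.Int.mod (pyBit code 1 + pyBit code 0) 2) - 3]

lemma genA_eq_fold (order : Int) :
    generate_QAM_mapping order =
      ((PySem.List.pyRange 0 order 1).foldl stepA PySem.Dict.empty).items := rfl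

lemma genB_eq_fold (order : Int) :
    generate_QAM_mapping_alt order =
      ((PySem.List.pyRange 0 (min order 16) 1).foldl stepB PySem.Dict.empty).items := rfl

lemma pyBit_mem (code i : Int) : pyBit code i = 0 ∨ pyBit code i = 1 := by
  unfold pyBit
  rw [PySem.Int.mod_eq_emod_of_pos (by norm_num)]
  omega

-- the branch table of A is the closed-form Gray decode of B, for bit operands
lemma level_eq (a b : Int) (ha : a = 0 ∨ a = 1) (hb : b = 0 ∨ b = 1) :
    (if ([a, b] : List Int) = [0, 0] then (-3 : Int)
     else if [a, b] = [0, 1] then -1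
     else if [a, b] = [1, 1] then 1
     else 3)
      = 2 * (2 * a + PySem.Int.mod (a + b) 2) - 3 := by
  rcases ha with rfl | rfl <;> rcases hb with rfl | rfl <;> decide

lemma stepA_eq_stepB : stepA = stepB := by
  funext d code
  unfold stepA stepB
  rw [level_eq _ _ (pyBit_mem code 3) (pyBit_mem code 2),
      level_eq _ _ (pyBit_mem code 1) (pyBit_mem code 0)]

lemma pyBit_mod16 (code i : Int) (hi : 0 ≤ i) (hi4 : i < 4) :
    pyBit code i = pyBit (code % 16) i := by
  unfold pyBit
  interval_cases i <;>
    · rw [PySem.Int.floordiv_eq_ediv_of_pos (by norm_num),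
          PySem.Int.floordiv_eq_ediv_of_pos (by norm_num),
          PySem.Int.mod_eq_emod_of_pos (by norm_num),
          PySem.Int.mod_eq_emod_of_pos (by norm_num)]
      try simp [Int.toNat]
      try omega

-- the dict after the first 16 codes
def d16 : PySem.Dict String (List Int) :=
  (PySem.List.pyRange 0 16 1).foldl stepA PySem.Dict.empty

set_option maxHeartbeats 4000000 in
lemma stepA_d16_fixed (code : Int) : stepA d16 code = d16 := by
  unfold stepA
  rw [pyBit_mod16 code 3 (by omega) (by omega), pyBit_mod16 code 2 (by omega) (by omega),
      pyBit_mod16 code 1 (by omega) (by omega), pyBit_mod16 code 0 (by omega) (by omega)]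
  have hm : 0 ≤ code % 16 ∧ code % 16 < 16 := ⟨Int.emod_nonneg _ (by norm_num), Int.emod_lt_of_pos _ (by norm_num)⟩
  obtain ⟨h1, h2⟩ := hm
  set m := code % 16 with hm'
  interval_cases m <;> decide

lemma foldl_d16_fixed (l : List Int) :
    l.foldl stepA d16 = d16 := by
  induction l with
  | nil => exact List.foldl_nil ..
  | cons c t ih => rw [List.foldl_cons, stepA_d16_fixed c]; exact ih

-- ===== VERDICT (by name: the statement is the Claim_ definition above) =====
theorem generate_QAM_mapping_spec : Claim_equal_generate_QAM_mapping := by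
  intro order _
  unfold Spec_generate_QAM_mapping
  rw [genA_eq_fold, genB_eq_fold, ← stepA_eq_stepB]
  by_cases h : order ≤ 16
  · rw [min_eq_left h]
  · have h16 : min order 16 = 16 := min_eq_right (by omega)
    rw [h16,
        PySem.List.pyRange_one_append 0 16 order (by omega) (by omega),
        List.foldl_append]
    exact congrArg _ (foldl_d16_fixed _)
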